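-- pv_equiv track=rewrite | github.com/anu-shree-anil/AI | ai_clustering.py | objective_func
-- ===== SOURCE A (Python) =====
-- def objective_func(state,marks):
--         tot=0
--         for i in range(0, len(marks)):
--             diff = []
--             for j in range(0, len(state)):
--
--                 d=abs(state[j]-marks[i])
--                 diff.append(d)
--             p = diff.index(min(diff))
--             tot += pow(diff[p], 2)
--
--         return tot
-- ===== SOURCE B (Python) =====
-- def objective_func(state, marks):
--     # Sort the centers once, then binary-search the nearest center per mark:
--     # O((n+k) log n) instead of A's O(n*k).
--     s = sorted(state)
--     n = len(s)
--     tot = 0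
--     for m in marks:
--         lo, hi = 0, n
--         while lo < hi:
--             mid = (lo + hi) // 2
--             if s[mid] < m:
--                 lo = mid + 1
--             else:
--                 hi = mid
--         if lo == 0:
--             best = s[0] - m
--         elif lo == n:
--             best = m - s[n - 1]
--         else:
--             d1 = m - s[lo - 1]
--             d2 = s[lo] - m
--             best = d1 if d1 < d2 else d2
--         tot += best * best
--     return tot
-- ===== Notes on version B (the rewrite author's own statement) =====
-- stated objective: faster
-- what changed: B sorts the centers once and finds each mark's nearest center by binary search on the sorted list, replacing A's per-mark linear scan that builds a distance list and re-scans it with min() and .index().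
import Mathlib
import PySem

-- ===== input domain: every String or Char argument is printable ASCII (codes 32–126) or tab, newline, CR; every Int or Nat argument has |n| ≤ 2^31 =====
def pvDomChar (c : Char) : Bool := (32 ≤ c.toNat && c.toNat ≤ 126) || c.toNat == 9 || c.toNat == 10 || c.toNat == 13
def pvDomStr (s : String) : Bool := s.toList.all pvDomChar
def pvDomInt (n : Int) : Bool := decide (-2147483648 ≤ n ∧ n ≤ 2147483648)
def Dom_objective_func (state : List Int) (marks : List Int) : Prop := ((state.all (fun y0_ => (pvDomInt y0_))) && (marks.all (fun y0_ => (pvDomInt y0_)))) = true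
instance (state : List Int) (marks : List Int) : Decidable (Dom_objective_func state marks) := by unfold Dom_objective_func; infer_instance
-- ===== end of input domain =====

-- B sorts the centers once and binary-searches the nearest center per mark instead of
-- A's per-mark linear scan; same return value wherever A returns.

-- ===== PORT A =====
-- Literal transliteration of A: for each mark, build the list of absolute
-- differences, take min() and its .index(), add diff[p] ** 2.
def objective_func (state : List Int) (marks : List Int) : Int :=
  (PySem.List.pyRange 0 (PySem.List.len marks)).foldl (fun tot i =>
    let diff : List Int :=
      (PySem.List.pyRange 0 (PySem.List.len state)).foldl
        (fun acc j => acc ++ [|PySem.List.pyGetD state j 0 - PySem.List.pyGetD marks i 0|]) []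
    match PySem.List.min? diff (fun x => x) with
    | none => tot      -- Python: min([]) raises ValueError here; excluded by Pre_
    | some mn =>
      match PySem.List.index? diff mn with
      | none => tot    -- unreachable: min? returns a member of diff
      | some p => tot + (PySem.List.pyGetD diff (p : Int) 0) ^ 2) 0

-- ===== PORT B =====
-- the 'while lo < hi' loop of Source B; indices stay in range (lo < hi ≤ len s), so getD is exact
def bsearchLoop (s : List Int) (m : Int) (lo hi : Nat) : Nat :=
  if lo < hi then
    let mid := (lo + hi) / 2
    if s.getD mid 0 < m then bsearchLoop s m (mid + 1) hi else bsearchLoop s m lo mid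
  else lo
termination_by hi - lo
decreasing_by all_goals omega

-- body of Source B's for-loop: squared distance of m to its nearest sorted center
-- (on empty s with marks ≠ [] Python raises IndexError; excluded by Pre_, getD's default is never read inside Pre_)
def nearestSq (s : List Int) (n : Nat) (m : Int) : Int :=
  let lo := bsearchLoop s m 0 n
  let best : Int :=
    if lo = 0 then s.getD 0 0 - m
    else if lo = n then m - s.getD (n - 1) 0
    else
      let d1 := m - s.getD (lo - 1) 0
      let d2 := s.getD lo 0 - m
      if d1 < d2 then d1 else d2
  best * best

def objective_func_alt (state : List Int) (marks : List Int) : Int :=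
  let s := PySem.List.sorted state (fun x => x)
  let n := s.length
  marks.foldl (fun tot m => tot + nearestSq s n m) 0

-- ===== PRECONDITION & SPEC =====
-- Pre_ excludes only state = [] with marks ≠ [], where A raises ValueError (min() of an
-- empty list) and B raises IndexError; A returns on every other input.
def Pre_objective_func (state : List Int) (marks : List Int) : Prop :=
  state ≠ [] ∨ marks = []
instance (state : List Int) (marks : List Int) : Decidable (Pre_objective_func state marks) := by
  unfold Pre_objective_func; infer_instance

def pvWitness_objective_func : List Int × List Int := ([3, -1, 7], [0, 5, 5, -2])

def Spec_objective_func (state : List Int) (marks : List Int) (out : Int) : Prop := out = objective_func_alt state marks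
instance (state : List Int) (marks : List Int) (out : Int) : Decidable (Spec_objective_func state marks out) := by unfold Spec_objective_func; infer_instance

-- ===== CLAIM (what is proved, stated in full; the proofs are below) =====
def Claim_equal_objective_func : Prop := ∀ (state : List Int) (marks : List Int), Dom_objective_func state marks → Pre_objective_func state marks → Spec_objective_func state marks (objective_func state marks)

-- ===== LEMMAS AND PROOFS =====

lemma getD_mono (s : List Int) (hs : s.Pairwise (· ≤ ·)) {i j : Nat} (hij : i ≤ j)
    (hj : j < s.length) : s.getD i 0 ≤ s.getD j 0 := by
  rcases Nat.lt_or_eq_of_le hij with h | h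
  · have := List.pairwise_iff_getElem.1 hs i j (by omega) hj h
    rw [List.getD_eq_getElem?_getD, List.getD_eq_getElem?_getD,
        List.getElem?_eq_getElem (by omega : i < s.length), List.getElem?_eq_getElem hj]
    simpa using this
  · subst h; rfl

lemma getD_mem (s : List Int) {k : Nat} (hk : k < s.length) : s.getD k 0 ∈ s := by
  rw [List.getD_eq_getElem s 0 hk]; exact List.getElem_mem hk

-- A's per-mark step: diff[diff.index(min(diff))] is min(diff) itself
lemma a_term (diff : List Int) (tot mn : Int)
    (hmin : PySem.List.min? diff (fun x => x) = some mn) :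
    (match PySem.List.index? diff mn with
      | none => tot
      | some p => tot + (PySem.List.pyGetD diff (p : Int) 0) ^ 2) = tot + mn ^ 2 := by
  have hmem : mn ∈ diff := PySem.List.min?_mem hmin
  have hsome : (PySem.List.index? diff mn).isSome := (PySem.List.index?_isSome_iff diff mn).2 hmem
  obtain ⟨p, hp⟩ := Option.isSome_iff_exists.1 hsome
  obtain ⟨hk, hval, _⟩ := PySem.List.getElem_of_index?_eq_some hp
  rw [hp]
  simp only [PySem.List.pyGetD_natCast]
  rw [List.getD_eq_getElem?_getD]
  simp [List.getElem?_eq_getElem hk, hval]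

-- the binary-search loop invariant: its result splits s into a prefix < m and a suffix ≥ m
lemma bsearch_inv (s : List Int) (hs : s.Pairwise (· ≤ ·)) (m : Int) (lo hi : Nat)
    (hhi : hi ≤ s.length) (hlh : lo ≤ hi)
    (hlow : ∀ k, k < lo → s.getD k 0 < m)
    (hhigh : ∀ k, hi ≤ k → k < s.length → m ≤ s.getD k 0) :
    bsearchLoop s m lo hi ≤ s.length ∧
    (∀ k, k < bsearchLoop s m lo hi → s.getD k 0 < m) ∧
    (∀ k, bsearchLoop s m lo hi ≤ k → k < s.length → m ≤ s.getD k 0) := by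
  induction lo, hi using bsearchLoop.induct s m with
  | case1 lo hi hlt mid hmid ih =>
    rw [bsearchLoop, if_pos hlt]
    rw [if_pos (show s.getD ((lo + hi) / 2) 0 < m from hmid)]
    refine ih (by omega) (by omega) ?_ hhigh
    intro k hk
    exact lt_of_le_of_lt (getD_mono s hs (by omega) (by omega)) hmid
  | case2 lo hi hlt mid hmid ih =>
    rw [bsearchLoop, if_pos hlt]
    rw [if_neg (show ¬ s.getD ((lo + hi) / 2) 0 < m from hmid)]
    refine ih (by omega) (by omega) hlow ?_
    intro k hk hks
    exact le_trans (not_lt.1 hmid) (getD_mono s hs (by omega) hks)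
  | case3 lo hi hlt =>
    rw [bsearchLoop, if_neg hlt]
    exact ⟨by omega, hlow, fun k hk hks => hhigh k (by omega) hks⟩

-- B's per-mark step computes (min of the distances to the sorted centers)²
lemma b_term (s : List Int) (hs : s.Pairwise (· ≤ ·)) (hne : s ≠ []) (m mn : Int)
    (hmin : PySem.List.min? (s.map (fun x => |x - m|)) (fun x => x) = some mn) :
    nearestSq s s.length m = mn ^ 2 := by
  have hlen : 0 < s.length := List.length_pos_iff.2 hne
  obtain ⟨hr1, hr2, hr3⟩ := bsearch_inv s hs m 0 s.length le_rfl (by omega)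
      (fun k hk => absurd hk (by omega)) (fun k hk hks => absurd hks (by omega))
  set r := bsearchLoop s m 0 s.length with hrdef
  have habs : ∀ k, k < s.length →
      |s.getD k 0 - m| = if k < r then m - s.getD k 0 else s.getD k 0 - m := by
    intro k hk
    split
    · have := hr2 k ‹_›; rw [abs_of_neg (by omega)]; ring
    · have := hr3 k (by omega) hk; rw [abs_of_nonneg (by omega)]
  have hminle : ∀ k, k < s.length → mn ≤ |s.getD k 0 - m| := by
    intro k hk
    exact PySem.List.min?_isMin hmin _ (List.mem_map_of_mem (getD_mem s hk))
  obtain ⟨x, hx, hxval⟩ := List.mem_map.1 (PySem.List.min?_mem hmin)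
  obtain ⟨kx, hkx, hkxval⟩ := List.mem_iff_getElem.1 hx
  have hmnval : mn = |s.getD kx 0 - m| := by
    rw [List.getD_eq_getElem s 0 hkx, hkxval, hxval]
  have hcr : r < s.length → mn ≤ s.getD r 0 - m := by
    intro h
    have := hminle r h; rwa [habs r h, if_neg (by omega)] at this
  have hcl : 0 < r → mn ≤ m - s.getD (r - 1) 0 := by
    intro h
    have := hminle (r - 1) (by omega)
    rwa [habs (r - 1) (by omega), if_pos (by omega)] at this
  have hcase :
      (kx < r ∧ mn = m - s.getD kx 0 ∧ m - s.getD (r - 1) 0 ≤ mn) ∨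
      (r ≤ kx ∧ mn = s.getD kx 0 - m ∧ s.getD r 0 - m ≤ mn) := by
    rcases Nat.lt_or_ge kx r with h | h
    · left
      have he : mn = m - s.getD kx 0 := by rw [hmnval, habs kx hkx, if_pos h]
      have hm := getD_mono s hs (show kx ≤ r - 1 by omega) (show r - 1 < s.length by omega)
      exact ⟨h, he, by omega⟩
    · right
      have he : mn = s.getD kx 0 - m := by rw [hmnval, habs kx hkx, if_neg (by omega)]
      have hm := getD_mono s hs h hkx
      exact ⟨h, he, by omega⟩
  simp only [nearestSq, ← hrdef]
  split_ifs with h0 hn hd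
  · rw [h0] at hcr hcase
    have h1 := hcr hlen
    have : s.getD 0 0 - m = mn := by omega
    rw [this]; ring
  · rw [hn] at hcl hcase
    have h1 := hcl (by omega)
    have : m - s.getD (s.length - 1) 0 = mn := by omega
    rw [this]; ring
  · have h1 := hcr (by omega)
    have h2 := hcl (by omega)
    have : m - s.getD (r - 1) 0 = mn := by omega
    rw [this]; ring
  · have h1 := hcr (by omega)
    have h2 := hcl (by omega)
    have : s.getD r 0 - m = mn := by omega
    rw [this]; ring

-- min() of permuted lists has the same value (min? picks the first minimum, but its value agrees)
lemma min?_val_perm (xs ys : List Int) (h : xs.Perm ys) {a b : Int}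
    (ha : PySem.List.min? xs (fun x => x) = some a)
    (hb : PySem.List.min? ys (fun x => x) = some b) : a = b :=
  le_antisymm (PySem.List.min?_isMin ha b (h.mem_iff.2 (PySem.List.min?_mem hb)))
    (PySem.List.min?_isMin hb a (h.symm.mem_iff.2 (PySem.List.min?_mem ha)))

-- both per-mark bodies agree (state nonempty)
lemma term_eq (state : List Int) (hne : state ≠ []) (tot m : Int) :
    (match PySem.List.min? (state.map (fun x => |x - m|)) (fun x => x) with
      | none => tot
      | some mn =>
        match PySem.List.index? (state.map (fun x => |x - m|)) mn with
        | none => tot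
        | some p => tot + (PySem.List.pyGetD (state.map (fun x => |x - m|)) (p : Int) 0) ^ 2)
    = tot + nearestSq (PySem.List.sorted state (fun x => x))
        (PySem.List.sorted state (fun x => x)).length m := by
  have hperm : (PySem.List.sorted state (fun x => x)).Perm state :=
    PySem.List.sorted_perm state (fun x => x) false
  have hsne : PySem.List.sorted state (fun x => x) ≠ [] := by
    intro h
    exact hne ((PySem.List.sorted_eq_nil_iff state (fun x => x) false).1 h)
  cases hA : PySem.List.min? (state.map (fun x => |x - m|)) (fun x => x) with
  | none =>
    exact absurd ((PySem.List.min?_eq_none_iff _ _).1 hA) (by simpa using hne)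
  | some mn =>
    cases hB : PySem.List.min? ((PySem.List.sorted state (fun x => x)).map (fun x => |x - m|))
        (fun x => x) with
    | none =>
      exact absurd ((PySem.List.min?_eq_none_iff _ _).1 hB) (by simpa using hsne)
    | some mn' =>
      have hv : mn' = mn := min?_val_perm _ _ ((hperm.map _)) hB hA
      have h2 := b_term _ (PySem.List.sorted_pairwise state (fun x => x)) hsne m mn' hB
      exact (a_term _ tot mn hA).trans (by rw [h2, hv])

-- ===== VERDICT (by name: the statement is the Claim_ definition above) =====

-- A's loop body as a function of the current mark (proof-only helper)
def aBody (state : List Int) (tot m : Int) : Int :=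
  let diff : List Int :=
    (PySem.List.pyRange 0 (PySem.List.len state)).foldl
      (fun acc j => acc ++ [|PySem.List.pyGetD state j 0 - m|]) []
  match PySem.List.min? diff (fun x => x) with
  | none => tot
  | some mn =>
    match PySem.List.index? diff mn with
    | none => tot
    | some p => tot + (PySem.List.pyGetD diff (p : Int) 0) ^ 2

lemma aBody_eq (state : List Int) (hne : state ≠ []) (tot m : Int) :
    aBody state tot m = tot + nearestSq (PySem.List.sorted state (fun x => x))
      (PySem.List.sorted state (fun x => x)).length m := by
  unfold aBody
  rw [PySem.List.foldl_pyRange_pyGetD state 0 (fun acc v => acc ++ [|v - m|]) [] le_rfl]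
  simp only [Int.toNat_zero, List.drop_zero,
    PySem.List.foldl_append_singleton_eq_map, List.nil_append]
  exact term_eq state hne tot m

theorem objective_func_spec : Claim_equal_objective_func := by
  intro state marks hdom hpre
  show objective_func state marks = objective_func_alt state marks
  rcases hpre with hne | hmk
  · change (PySem.List.pyRange 0 (PySem.List.len marks)).foldl
        (fun tot i => aBody state tot (PySem.List.pyGetD marks i 0)) 0 = _
    rw [PySem.List.foldl_pyRange_pyGetD marks 0 (aBody state) 0 le_rfl]
    simp only [Int.toNat_zero, List.drop_zero]
    rw [show aBody state = (fun tot m => tot + nearestSq (PySem.List.sorted state (fun x => x))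
          (PySem.List.sorted state (fun x => x)).length m) from
        funext fun tot => funext fun m => aBody_eq state hne tot m]
    rfl
  · subst hmk
    rfl
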